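-- pv_equiv track=rewrite | github.com/zerojin1014/Software_Study | 과소사과제/과소사3주차숙제3.py | solution
-- ===== SOURCE A (Python) =====
-- def solution(n):
--     a = 0
--     b = 1
--     c = a+b
--
--     if n <= 0:
--         return(0)
--     else:
--
--         while c <= n :
--             a = b
--             b = c
--             c = a + b
--
--         return(b)
-- ===== SOURCE B (Python) =====
-- def _fd(k):
--     # fast doubling: returns (F(k), F(k+1))
--     if k == 0:
--         return (0, 1)
--     a, b = _fd(k // 2)
--     c = a * (2 * b - a)
--     d = a * a + b * b
--     if k % 2 == 0:
--         return (c, d)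
--     return (d, c + d)
--
--
-- def _fib(k):
--     return _fd(k)[0]
--
--
-- def solution(n):
--     if n <= 0:
--         return 0
--     k = 1
--     while _fib(k) <= n:
--         k *= 2
--     lo, hi = 1, k
--     while hi - lo > 1:
--         mid = (lo + hi) // 2
--         if _fib(mid) <= n:
--             lo = mid
--         else:
--             hi = mid
--     return _fib(lo)
-- ===== Notes on version B (the rewrite author's own statement) =====
-- stated objective: alternative
-- what changed: A climbs the Fibonacci sequence value by value with a while loop; B computes Fibonacci numbers by fast doubling and locates the largest index with F(k) <= n by exponential growth followed by binary search over the index.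
import Mathlib
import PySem

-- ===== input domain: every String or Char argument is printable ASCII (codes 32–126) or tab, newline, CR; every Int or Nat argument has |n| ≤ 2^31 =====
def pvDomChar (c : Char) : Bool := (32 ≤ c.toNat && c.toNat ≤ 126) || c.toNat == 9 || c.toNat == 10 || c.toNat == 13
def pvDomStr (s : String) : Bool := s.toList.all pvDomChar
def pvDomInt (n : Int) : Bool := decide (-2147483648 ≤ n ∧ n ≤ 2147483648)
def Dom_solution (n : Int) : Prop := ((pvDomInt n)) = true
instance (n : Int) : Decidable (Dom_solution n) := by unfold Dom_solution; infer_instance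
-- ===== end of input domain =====

-- B replaces A's linear climb through the Fibonacci sequence by fast doubling plus an
-- exponential-growth-then-binary-search over the index (objective: alternative algorithm).

-- ===== PORT A =====
-- A's while loop; the fuel argument only makes the recursion total (proven sufficient below).
def solLoop : Nat → Int → Int → Int → Int → Int
  | 0, _, b, _, _ => b
  | fuel+1, _, b, c, n => if c ≤ n then solLoop fuel b c (b + c) n else b

def solution (n : Int) : Int :=
  if n ≤ 0 then 0 else solLoop (n.toNat + 1) 0 1 1 n

-- ===== PORT B =====
-- fast doubling: fd k = (F(k), F(k+1))
def fd : Nat → Int × Int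
  | 0 => (0, 1)
  | (k+1) =>
    let p := fd ((k+1) / 2)
    let a := p.1
    let b := p.2
    let c := a * (2 * b - a)
    let d := a * a + b * b
    if (k+1) % 2 == 0 then (c, d) else (d, c + d)
decreasing_by omega

def fibB (k : Nat) : Int := (fd k).1

-- exponential search: double k while F(k) ≤ n (fuel only for totality, proven sufficient below)
def growLoop : Nat → Int → Nat → Nat
  | 0, _, k => k
  | fuel+1, n, k => if fibB k ≤ n then growLoop fuel n (2 * k) else k

-- binary search for the largest index lo with F(lo) ≤ n (fuel only for totality)
def bsLoop : Nat → Int → Nat → Nat → Nat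
  | 0, _, lo, _ => lo
  | fuel+1, n, lo, hi =>
    if hi - lo ≤ 1 then lo
    else
      let mid := (lo + hi) / 2
      if fibB mid ≤ n then bsLoop fuel n mid hi else bsLoop fuel n lo mid

def solution_alt (n : Int) : Int :=
  if n ≤ 0 then 0
  else
    let k := growLoop (n.toNat + 2) n 1
    fibB (bsLoop k n 1 k)

-- ===== PRECONDITION & SPEC =====
def Spec_solution (n : Int) (out : Int) : Prop := out = solution_alt n
instance (n : Int) (out : Int) : Decidable (Spec_solution n out) := by unfold Spec_solution; infer_instance

-- ===== CLAIM (what is proved, stated in full; the proofs are below) =====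
def Claim_equal_solution : Prop := ∀ (n : Int), Dom_solution n → Spec_solution n (solution n)

-- ===== LEMMAS AND PROOFS =====

theorem fd_eq (k : Nat) : fd k = ((Nat.fib k : Int), (Nat.fib (k+1) : Int)) := by
  induction k using Nat.strong_induction_on with
  | _ k ih =>
    match k with
    | 0 => simp [fd]
    | (j+1) =>
      have hlt : (j+1) / 2 < j + 1 := by omega
      have ihh := ih ((j+1)/2) hlt
      rw [fd, ihh]
      set m := (j+1)/2 with hm
      have hle : Nat.fib m ≤ 2 * Nat.fib (m+1) := by
        have := Nat.fib_le_fib_succ (n := m); omega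
      rcases Nat.even_or_odd (j+1) with he | ho
      · obtain ⟨t, ht⟩ := he
        have hjm : j + 1 = 2 * m := by omega
        have h1 : Nat.fib (2*m) = Nat.fib m * (2 * Nat.fib (m+1) - Nat.fib m) := Nat.fib_two_mul m
        have h2 : Nat.fib (2*m+1) = Nat.fib (m+1) ^ 2 + Nat.fib m ^ 2 := Nat.fib_two_mul_add_one m
        have hmod : (j+1) % 2 = 0 := by omega
        simp only [hmod]
        rw [hjm, h1, h2]
        split_ifs with hif
        · rw [Prod.mk.injEq]
          push_cast [hle]
          constructor <;> ring
        · simp at hif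
      · obtain ⟨t, ht⟩ := ho
        have hjm : j + 1 = 2 * m + 1 := by omega
        have h2 : Nat.fib (2*m+1) = Nat.fib (m+1) ^ 2 + Nat.fib m ^ 2 := Nat.fib_two_mul_add_one m
        have h1 : Nat.fib (2*m) = Nat.fib m * (2 * Nat.fib (m+1) - Nat.fib m) := Nat.fib_two_mul m
        have h3 : Nat.fib (2*m+2) = Nat.fib (2*m) + Nat.fib (2*m+1) := by
          have := Nat.fib_add_two (n := 2*m); omega
        have hmod : (j+1) % 2 = 1 := by omega
        simp only [hmod]
        rw [hjm, h3, h1, h2, Prod.mk.injEq]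
        push_cast [hle]
        constructor <;> ring

theorem fibB_eq (k : Nat) : fibB k = (Nat.fib k : Int) := by
  simp [fibB, fd_eq]

-- F(k+2) ≥ k+1
theorem fib_lb (k : Nat) : k + 1 ≤ Nat.fib (k+2) := by
  induction k with
  | zero => simp
  | succ m ih =>
    show m + 2 ≤ Nat.fib (m+3)
    have h1 : Nat.fib (m+3) = Nat.fib (m+1) + Nat.fib (m+2) := by
      have := Nat.fib_add_two (n := m+1); omega
    have h2 : 0 < Nat.fib (m+1) := by
      have : 0 < m + 1 := by omega
      exact Nat.fib_pos.mpr this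
    omega

theorem fib_ge (k : Nat) : k ≤ Nat.fib k + 1 := by
  match k with
  | 0 => omega
  | 1 => simp [Nat.fib]
  | (m+2) => have := fib_lb m; omega

-- two indices bracketing the same n give the same Fibonacci value
theorem fib_uniq (n : Int) (j k : Nat) (_hj : 1 ≤ j) (_hk : 1 ≤ k)
    (h1 : (Nat.fib j : Int) ≤ n) (h2 : n < (Nat.fib (j+1) : Int))
    (h3 : (Nat.fib k : Int) ≤ n) (h4 : n < (Nat.fib (k+1) : Int)) :
    (Nat.fib j : Int) = (Nat.fib k : Int) := by
  rcases lt_trichotomy j k with h | h | h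
  · exfalso
    have : Nat.fib (j+1) ≤ Nat.fib k := Nat.fib_mono (by omega)
    have : (Nat.fib (j+1) : Int) ≤ (Nat.fib k : Int) := by exact_mod_cast this
    omega
  · rw [h]
  · exfalso
    have : Nat.fib (k+1) ≤ Nat.fib j := Nat.fib_mono (by omega)
    have : (Nat.fib (k+1) : Int) ≤ (Nat.fib j : Int) := by exact_mod_cast this
    omega

-- A's loop returns the bracketed Fibonacci value
theorem solLoop_spec : ∀ (fuel : Nat) (n b c : Int) (a : Int) (k : Nat),
    a = (Nat.fib k : Int) → b = (Nat.fib (k+1) : Int) → c = (Nat.fib (k+2) : Int) →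
    b ≤ n → (n + 1 - c).toNat < fuel →
    ∃ m : Nat, 1 ≤ m ∧ (Nat.fib m : Int) ≤ n ∧ n < (Nat.fib (m+1) : Int) ∧
      solLoop fuel a b c n = (Nat.fib m : Int) := by
  intro fuel
  induction fuel with
  | zero => intro n b c a k _ _ _ _ hf; omega
  | succ f ih =>
    intro n b c a k ha hb hc hbn hf
    by_cases hcn : c ≤ n
    · have hfib3 : (Nat.fib (k+1+2) : Int) = (Nat.fib (k+1) : Int) + (Nat.fib (k+2) : Int) := by
        have h := Nat.fib_add_two (n := k+1)
        have h2 : Nat.fib (k+1+1) = Nat.fib (k+2) := rfl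
        rw [h2] at h
        exact_mod_cast h
      have hb1 : (1 : Int) ≤ b := by
        have : 0 < Nat.fib (k+1) := Nat.fib_pos.mpr (by omega)
        have : (1 : Int) ≤ (Nat.fib (k+1) : Int) := by exact_mod_cast this
        omega
      have hmeas : (n + 1 - (b + c)).toNat < (n + 1 - c).toNat := by omega
      have := ih n c (b + c) b (k+1) hb hc (by rw [hb, hc, hfib3]) hcn (by omega)
      obtain ⟨m, hm⟩ := this
      exact ⟨m, hm.1, hm.2.1, hm.2.2.1, by simp [solLoop, hcn]; exact hm.2.2.2⟩
    · refine ⟨k+1, by omega, by omega, by show n < (Nat.fib (k+2) : Int); omega, ?_⟩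
      simp [solLoop, hcn, hb]

-- the exponential search ends at an index whose Fibonacci value exceeds n, and at least 2
theorem growLoop_spec : ∀ (fuel : Nat) (n : Int) (k : Nat),
    1 ≤ k → 1 ≤ n → n.toNat + 2 - k < fuel → fibB k ≤ n →
    2 ≤ growLoop fuel n k ∧ n < (Nat.fib (growLoop fuel n k) : Int) := by
  intro fuel
  induction fuel with
  | zero => intro n k hk hn hf _; omega
  | succ f ih =>
    intro n k hk hn hf hkle
    have hfb := fibB_eq k
    have hkbound : k ≤ n.toNat + 1 := by
      have h1 := fib_ge k
      have h2 : (Nat.fib k : Int) ≤ n := by rw [← hfb]; exact hkle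
      omega
    simp only [growLoop, if_pos hkle]
    by_cases h2 : fibB (2*k) ≤ n
    · exact ih n (2*k) (by omega) hn (by omega) h2
    · have : growLoop f n (2*k) = if fibB (2*k) ≤ n then growLoop (f-1) n (2*(2*k)) else 2*k := by
        cases f with
        | zero => omega
        | succ g => simp [growLoop]
      rw [this, if_neg h2]
      constructor
      · omega
      · rw [fibB_eq] at h2; omega

-- the binary search returns the largest index with F ≤ n, as a bracketed value
theorem bsLoop_spec : ∀ (fuel : Nat) (n : Int) (lo hi : Nat),
    1 ≤ lo → lo < hi → (Nat.fib lo : Int) ≤ n → n < (Nat.fib hi : Int) →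
    hi - lo ≤ fuel →
    ∃ m : Nat, 1 ≤ m ∧ (Nat.fib m : Int) ≤ n ∧ n < (Nat.fib (m+1) : Int) ∧
      bsLoop fuel n lo hi = m := by
  intro fuel
  induction fuel with
  | zero => intro n lo hi _ _ _ _ hf; omega
  | succ f ih =>
    intro n lo hi hlo hlt hle hgt hf
    by_cases hgap : hi - lo ≤ 1
    · have hhi : hi = lo + 1 := by omega
      exact ⟨lo, hlo, hle, by rw [← hhi]; exact hgt, by simp [bsLoop, hgap]⟩
    · have hmid1 : lo < (lo + hi) / 2 := by omega
      have hmid2 : (lo + hi) / 2 < hi := by omega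
      by_cases hm : fibB ((lo + hi) / 2) ≤ n
      · have hm' : (Nat.fib ((lo + hi) / 2) : Int) ≤ n := by rw [← fibB_eq]; exact hm
        obtain ⟨m, h⟩ := ih n ((lo + hi) / 2) hi (by omega) hmid2 hm' hgt (by omega)
        exact ⟨m, h.1, h.2.1, h.2.2.1, by simp [bsLoop, hgap, hm]; exact h.2.2.2⟩
      · have hm' : n < (Nat.fib ((lo + hi) / 2) : Int) := by rw [← fibB_eq]; omega
        obtain ⟨m, h⟩ := ih n lo ((lo + hi) / 2) hlo hmid1 hle hm' (by omega)
        exact ⟨m, h.1, h.2.1, h.2.2.1, by simp [bsLoop, hgap, hm]; exact h.2.2.2⟩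

-- ===== VERDICT (by name: the statement is the Claim_ definition above) =====
theorem solution_spec : Claim_equal_solution := by
  intro n _
  unfold Spec_solution solution solution_alt
  by_cases hn : n ≤ 0
  · simp [hn]
  · have hn1 : 1 ≤ n := by omega
    simp only [if_neg hn]
    have h1 : fibB 1 ≤ n := by rw [fibB_eq, Nat.fib_one]; omega
    have hgrow := growLoop_spec (n.toNat + 2) n 1 (by omega) hn1 (by omega) h1
    set K := growLoop (n.toNat + 2) n 1 with hK
    have hlo : (Nat.fib 1 : Int) ≤ n := by rw [Nat.fib_one]; omega
    obtain ⟨m, hm1, hm2, hm3, hm4⟩ :=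
      bsLoop_spec K n 1 K (by omega) (by omega) hlo hgrow.2 (by omega)
    obtain ⟨m', hm'1, hm'2, hm'3, hm'4⟩ :=
      solLoop_spec (n.toNat + 1) n 1 1 0 0 (by simp [Nat.fib_zero]) (by simp [Nat.fib_one])
        (by norm_num [Nat.fib_two]) hn1 (by omega)
    rw [hm'4, hm4, fibB_eq]
    exact fib_uniq n m' m hm'1 hm1 hm'2 hm'3 hm2 hm3
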